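-- pv_equiv track=rewrite | github.com/ethanrimes/campaign-management-platform | agents/researcher/agent.py | _generate_follow_up_queries
-- ===== SOURCE A (Python) =====
-- from typing import Any, Dict, List, Optional
--
-- def _generate_follow_up_queries(initial_results: List[Dict[str, Any]], initiative_data: Dict[str, Any]) -> List[str]:
--     """Generate follow-up queries based on initial results"""
--     follow_up_queries = []
--     initiative = initiative_data["initiative"]
--
--     # Extract common themes from initial results
--     common_words = {}
--     for result in initial_results:
--         words = result.get("snippet", "").lower().split()
--         for word in words:
--             if len(word) > 6:  # Focus on substantial words
--                 common_words[word] = common_words.get(word, 0) + 1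
--
--     # Get top words not in original queries
--     top_words = sorted(common_words.items(), key=lambda x: x[1], reverse=True)[:3]
--
--     if top_words:
--         follow_up_queries.append(f"{top_words[0][0]} {initiative.get('category', '')} strategies")
--
--     # Add specific platform queries
--     follow_up_queries.append(f"Instagram {initiative.get('category', '')} content ideas 2024")
--     follow_up_queries.append(f"Facebook advertising {initiative.get('category', '')} best practices")
--
--     return follow_up_queries
-- ===== SOURCE B (Python) =====
-- def _generate_follow_up_queries(initial_results, initiative_data):
--     """Generate follow-up queries based on initial results"""
--     initiative = initiative_data["initiative"]
--     category = initiative.get("category", "")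
--
--     # flatten to one word stream, then count, then single-pass argmax (no sort)
--     words = [w
--              for result in initial_results
--              for w in result.get("snippet", "").lower().split()
--              if len(w) > 6]
--     counts = {}
--     for w in words:
--         counts[w] = counts.get(w, 0) + 1
--
--     best = None
--     best_n = 0
--     for w, n in counts.items():
--         if best is None or n > best_n:
--             best, best_n = w, n
--
--     queries = [f"{best} {category} strategies"] if best is not None else []
--     queries.append(f"Instagram {category} content ideas 2024")
--     queries.append(f"Facebook advertising {category} best practices")
--     return queries
-- ===== Notes on version B (the rewrite author's own statement) =====
-- stated objective: simpler
-- what changed: B flattens the snippets into one filtered word stream, counts it in a single dict pass, and picks the top word with a strict-'>' argmax scan in insertion order instead of A's nested counting loop plus sort-and-take-3; Pre_ excludes inputs missing the 'initiative' key, on which both A and B raise KeyError.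
import Mathlib
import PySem

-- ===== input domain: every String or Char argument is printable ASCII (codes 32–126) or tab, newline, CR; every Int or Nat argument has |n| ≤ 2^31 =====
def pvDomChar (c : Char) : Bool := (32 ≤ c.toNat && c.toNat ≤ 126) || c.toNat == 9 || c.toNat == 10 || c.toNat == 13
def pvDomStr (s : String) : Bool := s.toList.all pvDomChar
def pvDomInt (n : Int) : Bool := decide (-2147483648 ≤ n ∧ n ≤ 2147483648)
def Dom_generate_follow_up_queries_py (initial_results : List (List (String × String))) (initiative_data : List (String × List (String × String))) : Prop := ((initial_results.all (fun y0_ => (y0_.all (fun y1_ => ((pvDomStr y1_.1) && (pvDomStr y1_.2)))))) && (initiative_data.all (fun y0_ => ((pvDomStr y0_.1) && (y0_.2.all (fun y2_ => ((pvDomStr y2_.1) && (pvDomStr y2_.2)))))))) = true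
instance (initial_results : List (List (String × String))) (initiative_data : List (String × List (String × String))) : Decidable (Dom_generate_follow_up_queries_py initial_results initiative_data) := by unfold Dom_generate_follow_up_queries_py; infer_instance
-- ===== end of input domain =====

-- B replaces A's sort-then-take-3 by flattening the word stream once, counting, and a single
-- strict-'>' argmax pass over the counts in insertion order (simpler: no sort, no slicing).

-- ===== PORT A =====
def generate_follow_up_queries_py (initial_results : List (List (String × String))) (initiative_data : List (String × List (String × String))) : List String :=
  let follow_up_queries : List String := []
  let initiative : List (String × String) :=
    (PySem.Dict.get? (PySem.Dict.mk initiative_data) "initiative").getD []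
  let common_words : PySem.Dict String Int :=
    initial_results.foldl (fun common_words result =>
      let words := PySem.Str.split₀ (PySem.Str.lower (PySem.Dict.getD (PySem.Dict.mk result) "snippet" ""))
      words.foldl (fun common_words word =>
        if 6 < PySem.Str.len word then
          common_words.insert word (common_words.getD word 0 + 1)
        else common_words) common_words) PySem.Dict.empty
  let top_words : List (String × Int) :=
    PySem.List.slice (PySem.List.sorted common_words.items (fun x => x.2) true) none (some 3)
  let follow_up_queries : List String :=
    match top_words with
    | [] => follow_up_queries
    | tw0 :: _ =>
        follow_up_queries ++ [tw0.1 ++ " " ++ PySem.Dict.getD (PySem.Dict.mk initiative) "category" "" ++ " strategies"]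
  let follow_up_queries := follow_up_queries ++ ["Instagram " ++ PySem.Dict.getD (PySem.Dict.mk initiative) "category" "" ++ " content ideas 2024"]
  let follow_up_queries := follow_up_queries ++ ["Facebook advertising " ++ PySem.Dict.getD (PySem.Dict.mk initiative) "category" "" ++ " best practices"]
  follow_up_queries

-- ===== PORT B =====
def generate_follow_up_queries_py_alt (initial_results : List (List (String × String))) (initiative_data : List (String × List (String × String))) : List String :=
  let initiative : List (String × String) :=
    (PySem.Dict.get? (PySem.Dict.mk initiative_data) "initiative").getD []
  let category : String := PySem.Dict.getD (PySem.Dict.mk initiative) "category" ""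
  let words : List String :=
    initial_results.flatMap (fun result =>
      (PySem.Str.split₀ (PySem.Str.lower (PySem.Dict.getD (PySem.Dict.mk result) "snippet" ""))).filter
        (fun w => 6 < PySem.Str.len w))
  let counts : PySem.Dict String Int :=
    words.foldl (fun counts w => counts.insert w (counts.getD w 0 + 1)) PySem.Dict.empty
  -- 'best is None or n > best_n' loop, state (best, best_n) as Option (String × Int)
  let best : Option (String × Int) :=
    counts.items.foldl (fun best p =>
      match best with
      | none => some p
      | some q => if q.2 < p.2 then some p else best) none
  let queries : List String :=
    match best with
    | some b => [b.1 ++ " " ++ category ++ " strategies"]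
    | none => []
  queries ++ ["Instagram " ++ category ++ " content ideas 2024",
              "Facebook advertising " ++ category ++ " best practices"]

-- ===== PRECONDITION & SPEC =====
-- Pre_ excludes exactly the inputs with no "initiative" key, on which A (and B) raise KeyError.
def Pre_generate_follow_up_queries_py (initial_results : List (List (String × String))) (initiative_data : List (String × List (String × String))) : Prop :=
  "initiative" ∈ initiative_data.map Prod.fst
instance (initial_results : List (List (String × String))) (initiative_data : List (String × List (String × String))) : Decidable (Pre_generate_follow_up_queries_py initial_results initiative_data) := by unfold Pre_generate_follow_up_queries_py; infer_instance

def pvWitness_generate_follow_up_queries_py : (List (List (String × String))) × (List (String × List (String × String))) :=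
  ([[("snippet", "Try Proven Strategies: proven strategies work")]], [("initiative", [("category", "food")])])

def Spec_generate_follow_up_queries_py (initial_results : List (List (String × String))) (initiative_data : List (String × List (String × String))) (out : List String) : Prop := out = generate_follow_up_queries_py_alt initial_results initiative_data
instance (initial_results : List (List (String × String))) (initiative_data : List (String × List (String × String))) (out : List String) : Decidable (Spec_generate_follow_up_queries_py initial_results initiative_data out) := by unfold Spec_generate_follow_up_queries_py; infer_instance

-- ===== CLAIM (what is proved, stated in full; the proofs are below) =====
def Claim_equal_generate_follow_up_queries_py : Prop := ∀ (initial_results : List (List (String × String))) (initiative_data : List (String × List (String × String))), Dom_generate_follow_up_queries_py initial_results initiative_data → Pre_generate_follow_up_queries_py initial_results initiative_data → Spec_generate_follow_up_queries_py initial_results initiative_data (generate_follow_up_queries_py initial_results initiative_data)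

-- ===== LEMMAS AND PROOFS =====

-- B's flatten-filter-then-count fold builds exactly A's nested counting fold.
lemma pv_counts_eq (ir : List (List (String × String))) :
    (ir.flatMap (fun result =>
        (PySem.Str.split₀ (PySem.Str.lower (PySem.Dict.getD (PySem.Dict.mk result) "snippet" ""))).filter
          (fun w => 6 < PySem.Str.len w))).foldl
      (fun counts w => counts.insert w (counts.getD w 0 + 1)) PySem.Dict.empty
  = ir.foldl (fun cw result =>
      let words := PySem.Str.split₀ (PySem.Str.lower (PySem.Dict.getD (PySem.Dict.mk result) "snippet" ""))
      words.foldl (fun cw word =>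
        if 6 < PySem.Str.len word then cw.insert word (cw.getD word 0 + 1) else cw) cw)
      (PySem.Dict.empty : PySem.Dict String Int) := by
  rw [List.foldl_flatMap]
  congr 1
  funext acc r
  rw [← PySem.List.foldl_ite_eq_foldl_filter]

-- the head of the insertBy fold (= stable reverse sort) is B's strict-'>' running argmax
lemma pv_argmax_head (xs : List (String × Int)) : ∀ (s : List (String × Int)),
    List.foldl (fun best p =>
        match best with
        | none => some p
        | some q => if q.2 < p.2 then some p else best) s.head? xs
    = (List.foldl (fun acc x => PySem.List.insertBy (fun a b => decide (b.2 < a.2)) x acc) s xs).head? := by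
  induction xs with
  | nil => intro s; rfl
  | cons x t ih =>
    intro s
    rw [List.foldl_cons, List.foldl_cons, ← ih]
    congr 1
    cases s with
    | nil => rfl
    | cons y ys =>
      simp only [PySem.List.insertBy, List.head?_cons]
      by_cases h : y.2 < x.2 <;> simp [h]

lemma pv_argmax_eq_sorted_head (items : List (String × Int)) :
    List.foldl (fun best p =>
        match best with
        | none => some p
        | some q => if q.2 < p.2 then some p else best) none items
    = (PySem.List.sorted items (fun x => x.2) true).head? := by
  rw [PySem.List.sorted_rev_eq_foldl_insertBy]
  exact pv_argmax_head items []

-- ===== VERDICT (by name: the statement is the Claim_ definition above) =====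
theorem generate_follow_up_queries_py_spec : Claim_equal_generate_follow_up_queries_py := by
  intro ir idata _hdom _hpre
  unfold Spec_generate_follow_up_queries_py
  unfold generate_follow_up_queries_py generate_follow_up_queries_py_alt
  simp only [pv_counts_eq, pv_argmax_eq_sorted_head]
  rw [PySem.List.slice_to _ (by norm_num)]
  cases h : PySem.List.sorted
      (ir.foldl (fun cw result =>
        let words := PySem.Str.split₀ (PySem.Str.lower (PySem.Dict.getD (PySem.Dict.mk result) "snippet" ""))
        words.foldl (fun cw word =>
          if 6 < PySem.Str.len word then cw.insert word (cw.getD word 0 + 1) else cw) cw)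
        (PySem.Dict.empty : PySem.Dict String Int)).items (fun x => x.2) true with
  | nil => simp
  | cons m t => simp
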